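-- pv_equiv track=rewrite | github.com/Sumitkumar005/Financial-Analyst-Agent | backend/scripts/chunk_markdown_files.py | clean_xbrl_noise
-- ===== SOURCE A (Python) =====
-- def clean_xbrl_noise(content: str) -> str:
--     """
--     Priority 2: Remove XBRL metadata noise from start of file.
--     """
--     lines = content.split('\n')
--     cleaned_lines = []
--     skip_xbrl = True
--
--     for line in lines:
--         # Stop skipping when we hit actual content
--         if skip_xbrl:
--             # Skip XBRL metadata lines
--             if (line.strip().startswith('xml') or
--                 line.strip().startswith('aapl-') or
--                 line.strip().startswith('false') or
--                 'http://fasb.org' in line or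
--                 'http://www.' in line and 'Member' in line or
--                 line.strip() == ''):
--                 continue
--             # Stop skipping when we see actual content
--             if line.strip() and not any(xbrl_indicator in line for xbrl_indicator in [
--                 'us-gaap:', 'xbrli:', 'iso4217:', 'aapl:', 'Member', 'http://'
--             ]):
--                 skip_xbrl = False
--
--         if not skip_xbrl:
--             cleaned_lines.append(line)
--
--     return '\n'.join(cleaned_lines)
-- ===== SOURCE B (Python) =====
-- def clean_xbrl_noise(content: str) -> str:
--     """Offset scan over the raw string: never builds a line list; finds the start
--     offset of the first real-content line and returns content[pos:] ('' if none)."""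
--     pos = 0
--     n = len(content)
--     while True:
--         nl = content.find('\n', pos)
--         end = n if nl == -1 else nl
--         line = content[pos:end]
--         s = line.strip()
--         if (not (s.startswith('xml') or s.startswith('aapl-') or s.startswith('false')
--                  or 'http://fasb.org' in line
--                  or ('http://www.' in line and 'Member' in line)
--                  or s == '')
--             and s != ''
--             and not any(ind in line for ind in (
--                 'us-gaap:', 'xbrli:', 'iso4217:', 'aapl:', 'Member', 'http://'))):
--             return content[pos:]
--         if nl == -1:
--             return ''
--         pos = nl + 1
-- ===== Notes on version B (the rewrite author's own statement) =====
-- stated objective: alternative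
-- what changed: A splits the content into a line list and folds a skip-flag accumulator over it, joining collected lines at the end; B never builds a line list: it scans newline offsets in the raw string (find/slice) and returns the suffix content[pos:] starting at the first real-content line ('' if none).
import Mathlib
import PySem

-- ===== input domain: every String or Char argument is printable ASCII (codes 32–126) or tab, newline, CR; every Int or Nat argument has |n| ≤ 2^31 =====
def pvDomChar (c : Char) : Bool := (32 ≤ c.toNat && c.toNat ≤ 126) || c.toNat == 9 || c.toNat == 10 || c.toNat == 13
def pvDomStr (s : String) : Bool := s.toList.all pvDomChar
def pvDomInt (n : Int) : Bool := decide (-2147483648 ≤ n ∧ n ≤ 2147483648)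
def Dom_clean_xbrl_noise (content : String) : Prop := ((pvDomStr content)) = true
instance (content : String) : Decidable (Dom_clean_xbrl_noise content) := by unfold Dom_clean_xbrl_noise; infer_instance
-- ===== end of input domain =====

-- B replaces A's split-into-lines + stateful accumulate loop by an offset scan over the
-- raw string (never builds a line list; returns the suffix of the input); objective: alternative.

-- ===== PORT A =====
-- A's loop body: state = (cleaned_lines, skip_xbrl)
def pvStepA (st : List String × Bool) (line : String) : List String × Bool :=
  let cleaned := st.1
  let skip := st.2
  if skip then
    if (PySem.Str.startswith (PySem.Str.strip line) "xml" ||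
        PySem.Str.startswith (PySem.Str.strip line) "aapl-" ||
        PySem.Str.startswith (PySem.Str.strip line) "false" ||
        PySem.Str.isIn "http://fasb.org" line ||
        (PySem.Str.isIn "http://www." line && PySem.Str.isIn "Member" line) ||
        (PySem.Str.strip line == "")) then
      (cleaned, skip)          -- continue
    else
      let skip' :=
        if ((PySem.Str.strip line != "") &&
            !(PySem.Str.isIn "us-gaap:" line || PySem.Str.isIn "xbrli:" line ||
              PySem.Str.isIn "iso4217:" line || PySem.Str.isIn "aapl:" line ||
              PySem.Str.isIn "Member" line || PySem.Str.isIn "http://" line)) then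
          false
        else skip
      if skip' then (cleaned, skip') else (cleaned ++ [line], skip')
  else (cleaned ++ [line], skip)

def clean_xbrl_noise (content : String) : String :=
  let lines := (PySem.Str.split? content "\n").getD []   -- sep "\n" ≠ "": never the ValueError case
  PySem.Str.join "\n" (lines.foldl pvStepA ([], true)).1

-- ===== PORT B =====
-- Source B's `content.find('\n', pos)` + slice `content[pos:end]`, ported exactly as a
-- structural scan to the next newline on the character list (line before it, rest after it).
def pvSplitFirst : List Char → List Char × Option (List Char)
  | [] => ([], none)
  | c :: r =>
    if c = '\n' then ([], some r)
    else
      let p := pvSplitFirst r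
      (c :: p.1, p.2)

-- termination helper for pvGoB (cited by decreasing_by)
lemma pvSplitFirst_some_length : ∀ (cs r : List Char), (pvSplitFirst cs).2 = some r → r.length < cs.length := by
  intro cs
  induction cs with
  | nil => intro r h; simp [pvSplitFirst] at h
  | cons c t ih =>
    intro r h
    by_cases hc : c = '\n'
    · simp [pvSplitFirst, hc] at h
      simp [← h]
    · simp [pvSplitFirst, hc] at h
      exact Nat.lt_succ_of_lt (ih r h)

-- Source B's skip condition and content condition on the current line
def pvSkipLine (line : String) : Bool :=
  PySem.Str.startswith (PySem.Str.strip line) "xml" ||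
  PySem.Str.startswith (PySem.Str.strip line) "aapl-" ||
  PySem.Str.startswith (PySem.Str.strip line) "false" ||
  PySem.Str.isIn "http://fasb.org" line ||
  (PySem.Str.isIn "http://www." line && PySem.Str.isIn "Member" line) ||
  (PySem.Str.strip line == "")

def pvContentLine (line : String) : Bool :=
  (PySem.Str.strip line != "") &&
  !(PySem.Str.isIn "us-gaap:" line || PySem.Str.isIn "xbrli:" line ||
    PySem.Str.isIn "iso4217:" line || PySem.Str.isIn "aapl:" line ||
    PySem.Str.isIn "Member" line || PySem.Str.isIn "http://" line)

-- Source B's while-loop: cs is content[pos:]; return cs at the trigger, [] at end of string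
def pvGoB (cs : List Char) : List Char :=
  if !pvSkipLine (String.ofList (pvSplitFirst cs).1) &&
     pvContentLine (String.ofList (pvSplitFirst cs).1) then cs
  else
    match h : (pvSplitFirst cs).2 with
    | none => []
    | some rest => pvGoB rest
termination_by cs.length
decreasing_by exact pvSplitFirst_some_length cs rest h

def clean_xbrl_noise_alt (content : String) : String :=
  String.ofList (pvGoB content.toList)

-- ===== PRECONDITION & SPEC =====
def Spec_clean_xbrl_noise (content : String) (out : String) : Prop := out = clean_xbrl_noise_alt content
instance (content : String) (out : String) : Decidable (Spec_clean_xbrl_noise content out) := by unfold Spec_clean_xbrl_noise; infer_instance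

-- ===== CLAIM (what is proved, stated in full; the proofs are below) =====
def Claim_equal_clean_xbrl_noise : Prop := ∀ (content : String), Dom_clean_xbrl_noise content → Spec_clean_xbrl_noise content (clean_xbrl_noise content)

-- ===== LEMMAS AND PROOFS =====

-- the list of lines, characterised through pvSplitFirst (proof-side mirror of split('\n'))
def pvLines (cs : List Char) : List (List Char) :=
  match h : (pvSplitFirst cs).2 with
  | none => [(pvSplitFirst cs).1]
  | some r => (pvSplitFirst cs).1 :: pvLines r
termination_by cs.length
decreasing_by exact pvSplitFirst_some_length cs r h

lemma pvLines_ne_nil (cs : List Char) : pvLines cs ≠ [] := by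
  unfold pvLines
  split <;> simp

lemma pvLines_none {cs : List Char} (h : (pvSplitFirst cs).2 = none) :
    pvLines cs = [(pvSplitFirst cs).1] := by
  unfold pvLines; split <;> simp_all

lemma pvLines_some {cs r : List Char} (h : (pvSplitFirst cs).2 = some r) :
    pvLines cs = (pvSplitFirst cs).1 :: pvLines r := by
  unfold pvLines
  split
  · simp_all
  · rename_i r' h'
    rw [h] at h'
    cases h'
    exact congrArg _ (pvLines.eq_def r)

lemma pvSplitFirst_recompose (cs : List Char) :
    cs = (pvSplitFirst cs).1 ++
      (match (pvSplitFirst cs).2 with | none => [] | some r => '\n' :: r) := by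
  induction cs with
  | nil => rfl
  | cons c t ih =>
    by_cases hc : c = '\n'
    · subst hc; simp only [pvSplitFirst]; simp
    · simp only [pvSplitFirst, if_neg hc]
      cases h : (pvSplitFirst t).2 with
      | none => rw [h] at ih; simpa using ih
      | some r => rw [h] at ih; simpa using ih

-- joining the lines with '\n' gives back the characters
lemma pvJoin_pvLines (cs : List Char) :
    PySem.Chars.join ['\n'] (pvLines cs) = cs := by
  unfold PySem.Chars.join
  induction hn : cs.length using Nat.strong_induction_on generalizing cs with
  | _ n ih =>
    cases h : (pvSplitFirst cs).2 with
    | none =>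
      rw [pvLines_none h]
      conv_rhs => rw [pvSplitFirst_recompose cs]
      simp [h, List.intercalate]
    | some r =>
      rw [pvLines_some h]
      have hr : r.length < cs.length := pvSplitFirst_some_length cs r h
      have hrec := ih r.length (hn ▸ hr) r rfl
      cases hl : pvLines r with
      | nil => exact absurd hl (pvLines_ne_nil r)
      | cons a t =>
        rw [hl] at hrec
        have hcc : ['\n'].intercalate ((pvSplitFirst cs).1 :: a :: t)
            = (pvSplitFirst cs).1 ++ '\n' :: ['\n'].intercalate (a :: t) := by
          simp [List.intercalate, List.intersperse]
        rw [hcc, hrec]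
        conv_rhs => rw [pvSplitFirst_recompose cs]
        simp [h]

-- PySem's split('\n') worker equals the pvSplitFirst recursion
lemma pvGo_spec : ∀ (fuel : Nat) (l cur : List Char) (acc : List (List Char)),
    l.length < fuel →
    PySem.Chars.splitOn.go ['\n'] fuel l cur acc =
      acc.reverse ++ (pvLines l).modifyHead (cur.reverse ++ ·) := by
  intro fuel
  induction fuel with
  | zero => intro l cur acc h; exact absurd h (Nat.not_lt_zero _)
  | succ fuel ih =>
    intro l cur acc h
    cases l with
    | nil =>
      rw [PySem.Chars.splitOn.go]
      · rw [pvLines_none (by simp [pvSplitFirst])]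
        simp [pvSplitFirst]
      · omega
    | cons c rest =>
      by_cases hc : c = '\n'
      · subst hc
        rw [PySem.Chars.splitOn.go]
        simp only [List.isPrefixOf, Bool.and_true, beq_self_eq_true, if_pos, List.length_cons,
          List.length_nil, List.drop_succ_cons, List.drop_zero]
        rw [ih rest [] (cur.reverse :: acc) (Nat.lt_of_succ_lt_succ h)]
        rw [pvLines_some (show (pvSplitFirst ('\n'::rest)).2 = some rest by simp [pvSplitFirst])]
        cases hl : pvLines rest with
        | nil => exact absurd hl (pvLines_ne_nil rest)
        | cons a t => simp [pvSplitFirst]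
      · rw [PySem.Chars.splitOn.go]
        simp only [List.isPrefixOf, Bool.and_true, Ne.symm hc, beq_iff_eq, if_neg]
        rw [ih rest (c :: cur) acc (Nat.lt_of_succ_lt_succ h)]
        cases hsnd : (pvSplitFirst rest).2 with
        | none =>
          rw [pvLines_none hsnd,
            pvLines_none (show (pvSplitFirst (c::rest)).2 = none by simp [pvSplitFirst, hc, hsnd])]
          simp [pvSplitFirst, hc]
        | some r =>
          rw [pvLines_some hsnd,
            pvLines_some (show (pvSplitFirst (c::rest)).2 = some r by simp [pvSplitFirst, hc, hsnd])]
          simp [pvSplitFirst, hc]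

lemma pvSplitOn_eq_pvLines (cs : List Char) :
    PySem.Chars.splitOn cs ['\n'] = pvLines cs := by
  unfold PySem.Chars.splitOn
  rw [pvGo_spec (cs.length + 1) cs [] [] (Nat.lt_succ_self _)]
  cases hl : pvLines cs with
  | nil => exact absurd hl (pvLines_ne_nil cs)
  | cons a t => simp

-- the step equations of B's scan
lemma pvGoB_trigger {cs : List Char}
    (h : (!pvSkipLine (String.ofList (pvSplitFirst cs).1) &&
          pvContentLine (String.ofList (pvSplitFirst cs).1)) = true) :
    pvGoB cs = cs := by
  unfold pvGoB; simp [h]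

lemma pvGoB_none {cs : List Char}
    (ht : (!pvSkipLine (String.ofList (pvSplitFirst cs).1) &&
           pvContentLine (String.ofList (pvSplitFirst cs).1)) = false)
    (h : (pvSplitFirst cs).2 = none) :
    pvGoB cs = [] := by
  unfold pvGoB
  rw [ht]
  simp only [Bool.false_eq_true, if_false]
  split <;> simp_all

lemma pvGoB_some {cs r : List Char}
    (ht : (!pvSkipLine (String.ofList (pvSplitFirst cs).1) &&
           pvContentLine (String.ofList (pvSplitFirst cs).1)) = false)
    (h : (pvSplitFirst cs).2 = some r) :
    pvGoB cs = pvGoB r := by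
  conv_lhs => rw [pvGoB.eq_def]
  rw [ht]
  simp only [Bool.false_eq_true, if_false]
  split
  · simp_all
  · rename_i r' h'
    rw [h] at h'
    cases h'
    rfl

-- Str.join over ofList-lines is ofList of the Chars.join
lemma pvStrJoin_ofList (ls : List (List Char)) :
    PySem.Str.join "\n" (ls.map String.ofList) = String.ofList (PySem.Chars.join ['\n'] ls) := by
  unfold PySem.Str.join
  congr 1
  simp [Function.comp_def]

-- once skip_xbrl is False, A appends the line unconditionally
lemma pvStepA_false (acc : List String) (l : String) :
    pvStepA (acc, false) l = (acc ++ [l], false) := rfl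

-- A's step (skip still on) written with the named predicates (definitionally A's inline conditions)
lemma pvStepA_true (acc : List String) (l : String) :
    pvStepA (acc, true) l =
      if pvSkipLine l then (acc, true)
      else if pvContentLine l then (acc ++ [l], false)
      else (acc, true) := by
  cases hs : pvSkipLine l with
  | true =>
    have hs' := hs; unfold pvSkipLine at hs'
    unfold pvStepA; rw [hs']; rfl
  | false =>
    have hs' := hs; unfold pvSkipLine at hs'
    cases hc : pvContentLine l with
    | true =>
      have hc' := hc; unfold pvContentLine at hc'
      unfold pvStepA; rw [hs', hc']; rfl
    | false =>
      have hc' := hc; unfold pvContentLine at hc'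
      unfold pvStepA; rw [hs', hc']; rfl

-- once skip_xbrl is False, A appends every remaining line
lemma pvFoldA_false (ls : List String) (acc : List String) :
    ls.foldl pvStepA (acc, false) = (acc ++ ls, false) := by
  induction ls generalizing acc with
  | nil => simp
  | cons l ls ih =>
    rw [List.foldl_cons, pvStepA_false]
    simpa using ih (acc ++ [l])

-- A's loop from the initial state is a boundary search over the lines
lemma pvFoldA_true (ls : List String) :
    ls.foldl pvStepA ([], true) =
      match ls.findIdx? (fun l => !pvSkipLine l && pvContentLine l) with
      | some i => (ls.drop i, false)
      | none => ([], true) := by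
  induction ls with
  | nil => rfl
  | cons l ls ih =>
    rw [List.foldl_cons, pvStepA_true, List.findIdx?_cons]
    cases hs : pvSkipLine l with
    | true =>
      simp only [Bool.not_true, Bool.false_and, Bool.false_eq_true, if_false, reduceIte]
      rw [ih]
      cases h : ls.findIdx? (fun l => !pvSkipLine l && pvContentLine l) <;> simp [h]
    | false =>
      cases hc : pvContentLine l with
      | true => simp [pvFoldA_false]
      | false =>
        simp only [Bool.not_false, Bool.true_and, Bool.false_eq_true, reduceIte]
        rw [ih]
        cases h : ls.findIdx? (fun l => !pvSkipLine l && pvContentLine l) <;> simp [h]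

-- B's offset scan computes the same boundary search over the lines
lemma pvGoB_spec (cs : List Char) :
    String.ofList (pvGoB cs) =
      match (List.map String.ofList (pvLines cs)).findIdx?
              (fun l => !pvSkipLine l && pvContentLine l) with
      | some i => PySem.Str.join "\n" ((List.map String.ofList (pvLines cs)).drop i)
      | none => "" := by
  induction hn : cs.length using Nat.strong_induction_on generalizing cs with
  | _ n ih =>
    cases ht : (!pvSkipLine (String.ofList (pvSplitFirst cs).1) &&
                pvContentLine (String.ofList (pvSplitFirst cs).1)) with
    | true =>
      have hdec : ∃ tl, pvLines cs = (pvSplitFirst cs).1 :: tl := by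
        cases h : (pvSplitFirst cs).2
        · exact ⟨[], pvLines_none h⟩
        · exact ⟨_, pvLines_some h⟩
      obtain ⟨tl, htl⟩ := hdec
      rw [pvGoB_trigger ht, htl]
      simp only [List.map_cons, List.findIdx?_cons, ht, if_pos, List.drop_zero]
      rw [← List.map_cons, ← htl, pvStrJoin_ofList, pvJoin_pvLines]
    | false =>
      cases h : (pvSplitFirst cs).2 with
      | none =>
        rw [pvGoB_none ht h, pvLines_none h]
        simp [List.findIdx?_cons, ht]
      | some r =>
        have hr : r.length < cs.length := pvSplitFirst_some_length cs r h
        have hrec := ih r.length (hn ▸ hr) r rfl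
        rw [pvGoB_some ht h, pvLines_some h, hrec]
        simp only [List.map_cons, List.findIdx?_cons, ht, Bool.false_eq_true, if_false]
        cases hfi : (List.map String.ofList (pvLines r)).findIdx?
            (fun l => !pvSkipLine l && pvContentLine l) <;> simp [hfi]

-- ===== VERDICT (by name: the statement is the Claim_ definition above) =====
theorem clean_xbrl_noise_spec : Claim_equal_clean_xbrl_noise := by
  intro content _
  show clean_xbrl_noise content = clean_xbrl_noise_alt content
  unfold clean_xbrl_noise clean_xbrl_noise_alt
  have hsplit : (PySem.Str.split? content "\n").getD []
      = (pvLines content.toList).map String.ofList := by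
    unfold PySem.Str.split? PySem.Chars.split?
    rw [show "\n".toList = ['\n'] from rfl]
    simp [pvSplitOn_eq_pvLines]
  show PySem.Str.join "\n"
      (((PySem.Str.split? content "\n").getD []).foldl pvStepA ([], true)).1
    = String.ofList (pvGoB content.toList)
  rw [hsplit, pvFoldA_true, pvGoB_spec]
  cases hfi : ((pvLines content.toList).map String.ofList).findIdx?
      (fun l => !pvSkipLine l && pvContentLine l) <;> simp [hfi] <;> rfl
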